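-- pv_equiv track=rewrite | github.com/IndigoChild88/Quantum-Computing | Traffic_Simulation.py | route_filter
-- ===== SOURCE A (Python) =====
-- def route_filter(routes, max_routes=3):
--     filtered_routes = []
--     #removes duplicate lists
--     routes = [list(t) for t in set(tuple(element) for element in routes)]
--     if len(routes)>max_routes:
--         for x in range(max_routes):
--         #gets the smallest paths
--             filtered_routes.append(routes.pop( routes.index(min(routes))))
--
--         return filtered_routes
--     else:
--         return routes
-- ===== SOURCE B (Python) =====
-- def route_filter(routes, max_routes=3):
--     # dedupe, sort once, then collect routes until we have max_routes of them
--     smallest = []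
--     for t in sorted({tuple(r) for r in routes}):
--         if len(smallest) >= max_routes:
--             break
--         smallest.append(list(t))
--     return smallest
-- ===== Notes on version B (the rewrite author's own statement) =====
-- stated objective: simpler
-- what changed: A repeatedly scans the deduped list for its minimum and pops it (k passes of min+index+pop); B sorts the deduped routes once and collects them in one pass until it has max_routes. Pre_ excludes only the else-branch returns of 2+ deduped routes, where A's output order is Python's accidental hash-dependent set-iteration order.
-- outside the precondition, e.g. on route_filter([[28], [0], [34]], 5): A returns [[28], [0], [34]], B returns [[0], [28], [34]]
import Mathlib
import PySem

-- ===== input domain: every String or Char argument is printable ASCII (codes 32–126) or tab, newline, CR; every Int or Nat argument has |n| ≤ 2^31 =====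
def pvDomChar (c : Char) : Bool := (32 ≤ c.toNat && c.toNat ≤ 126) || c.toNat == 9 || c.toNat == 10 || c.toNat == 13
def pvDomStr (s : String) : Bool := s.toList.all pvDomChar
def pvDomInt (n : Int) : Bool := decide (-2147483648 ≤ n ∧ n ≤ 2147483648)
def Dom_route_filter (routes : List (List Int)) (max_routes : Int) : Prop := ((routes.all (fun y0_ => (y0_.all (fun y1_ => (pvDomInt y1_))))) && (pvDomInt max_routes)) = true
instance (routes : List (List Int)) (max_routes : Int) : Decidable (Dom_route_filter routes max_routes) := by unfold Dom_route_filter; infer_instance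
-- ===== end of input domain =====

-- B dedupes then sorts once and slices the first max_routes, instead of A's repeated min-scan-and-pop.


-- ===== PORT A =====
-- one iteration of A's loop body: filtered_routes.append(routes.pop(routes.index(min(routes))))
def routeSelStep (st : List (List Int) × List (List Int)) : List (List Int) × List (List Int) :=
  match PySem.List.min? st.2 (fun x => x) with
  | none => st          -- min() on empty: unreachable in the taken branch
  | some m =>
    match PySem.List.index? st.2 m with
    | none => st
    | some i =>
      match PySem.List.pop? st.2 (i : Int) with
      | none => st
      | some (v, rest) => (st.1 ++ [v], rest)

def route_filter (routes : List (List Int)) (max_routes : Int) : List (List Int) :=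
  -- routes = [list(t) for t in set(tuple(element) for element in routes)]
  let routes2 := PySem.Set.ofList routes
  if PySem.List.len routes2 > max_routes then
    ((PySem.List.pyRange 0 max_routes 1).foldl (fun st _ => routeSelStep st) ([], routes2)).1
  else routes2

-- ===== PORT B =====
-- the for-loop with its 'collected enough' break, as structural recursion over the sorted list
def takeSmallest (max_routes : Int) (acc : List (List Int)) : List (List Int) → List (List Int)
  | [] => acc
  | t :: rest =>
    if (PySem.List.len acc) ≥ max_routes then acc
    else takeSmallest max_routes (acc ++ [t]) rest

def route_filter_alt (routes : List (List Int)) (max_routes : Int) : List (List Int) :=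
  takeSmallest max_routes [] (PySem.List.sorted (PySem.Set.ofList routes) (fun x => x) false)

-- ===== PRECONDITION & SPEC =====
-- Pre_ excludes inputs whose deduped route list has ≥ 2 elements and is returned whole (the else
-- branch): there A returns the routes in Python's hash-dependent set-iteration order, an accident
-- of A's implementation that no port can reproduce; B returns them sorted there.
def Pre_route_filter (routes : List (List Int)) (max_routes : Int) : Prop :=
  ((PySem.Set.ofList routes).length : Int) > max_routes ∨ (PySem.Set.ofList routes).length ≤ 1
instance (routes : List (List Int)) (max_routes : Int) : Decidable (Pre_route_filter routes max_routes) := by unfold Pre_route_filter; infer_instance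
def pvWitness_route_filter : List (List Int) × Int := ([[1], [2], [3], [4]], 2)

def Spec_route_filter (routes : List (List Int)) (max_routes : Int) (out : List (List Int)) : Prop := out = route_filter_alt routes max_routes
instance (routes : List (List Int)) (max_routes : Int) (out : List (List Int)) : Decidable (Spec_route_filter routes max_routes out) := by unfold Spec_route_filter; infer_instance

-- ===== CLAIM (what is proved, stated in full; the proofs are below) =====
def Claim_equal_route_filter : Prop := ∀ (routes : List (List Int)) (max_routes : Int), Dom_route_filter routes max_routes → Pre_route_filter routes max_routes → Spec_route_filter routes max_routes (route_filter routes max_routes)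

-- ===== LEMMAS AND PROOFS =====

-- the port's elaborated Decidable instance for List-Int comparison vs the LinearOrder one
theorem sorted_irrel (d1 d2 : DecidableRel (fun (a b : List Int) => a < b))
    (xs : List (List Int)) (key : List Int → List Int) (rev : Bool) :
    @PySem.List.sorted (List Int) (List Int) List.instLT d1 xs key rev
      = @PySem.List.sorted (List Int) (List Int) List.instLT d2 xs key rev := by
  congr 1

theorem min?_irrel (d1 d2 : DecidableRel (fun (a b : List Int) => a < b))
    (xs : List (List Int)) (key : List Int → List Int) :
    @PySem.List.min? (List Int) (List Int) List.instLT d1 xs key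
      = @PySem.List.min? (List Int) (List Int) List.instLT d2 xs key := by
  congr 1

-- popping the element at the first index of the minimum erases the minimum
theorem routeSelStep_eq (acc s : List (List Int)) (m : List Int)
    (hm : PySem.List.min? s (fun x => x) = some m) :
    routeSelStep (acc, s) = (acc ++ [m], s.erase m) := by
  have hmem : m ∈ s := PySem.List.min?_mem hm
  cases hidx : PySem.List.index? s m with
  | none => exact absurd ((PySem.List.index?_eq_none_iff s m).mp hidx) (by simpa using hmem)
  | some i =>
    obtain ⟨hk, hget, -⟩ := PySem.List.getElem_of_index?_eq_some hidx
    obtain ⟨pre, suf, hs, hlen, hpre⟩ := (PySem.List.index?_eq_some_iff s m i).mp hidx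
    have hpop : PySem.List.pop? s (i : Int) = some (s[i], s.eraseIdx i) :=
      PySem.List.pop?_natCast s i hk
    have herase : s.eraseIdx i = s.erase m := by
      subst hs; rw [← hlen, List.eraseIdx_append_of_length_le (Nat.le_refl _),
        List.erase_append_right _ hpre]
      simp
    have hidx' : List.idxOf? m s = some i := by simpa using hidx
    simp [routeSelStep, hm, hidx', hpop, hget, herase]

-- the head of sorted(s) on a nodup list is its minimum
theorem sorted_cons_min (s : List (List Int)) (hnd : s.Nodup) (m : List Int)
    (hm : PySem.List.min? s (fun x => x) = some m) :
    PySem.List.sorted s (fun x => x) false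
      = m :: PySem.List.sorted (s.erase m) (fun x => x) false := by
  have hmem : m ∈ s := PySem.List.min?_mem hm
  rw [min?_irrel _ LinearOrder.toDecidableLT] at hm
  have hperm : (m :: PySem.List.sorted (s.erase m) (fun x => x) false).Perm s :=
    ((PySem.List.sorted_perm (s.erase m) _ _).cons m).trans (List.perm_cons_erase hmem).symm
  have hpw : (m :: PySem.List.sorted (s.erase m) (fun x => x) false).Pairwise
      (fun a b => a < b) := by
    rw [List.pairwise_cons]
    refine ⟨?_, ?_⟩
    · intro y hy
      have hy' : y ∈ s.erase m := (PySem.List.mem_sorted _ _ _ _).mp hy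
      have hle : m ≤ y := PySem.List.min?_isMin hm y (List.mem_of_mem_erase hy')
      exact lt_of_le_of_ne hle (fun h => hnd.not_mem_erase (h ▸ hy'))
    · have hle : (PySem.List.sorted (s.erase m) (fun x => x) false).Pairwise
          (fun a b : List Int => a ≤ b) := by
        rw [sorted_irrel _ LinearOrder.toDecidableLT]
        exact PySem.List.sorted_pairwise (s.erase m) (fun x => x)
      have hnd' := ((PySem.List.sorted_perm (s.erase m) (fun x => x) false).nodup_iff).mpr
        (hnd.erase m)
      simp only [List.Nodup] at hnd'
      exact (hle.and hnd').imp (fun h => lt_of_le_of_ne h.1 h.2)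
  rw [sorted_irrel _ LinearOrder.toDecidableLT s]
  exact PySem.List.sorted_eq_of_perm_of_pairwise_lt s _ (fun x => x) hperm hpw

-- A's selection loop over any index list of length k produces the k smallest in sorted order
theorem sel_fold (l : List Int) :
    ∀ (acc s : List (List Int)), s.Nodup → l.length ≤ s.length →
    (l.foldl (fun st _ => routeSelStep st) (acc, s)).1
      = acc ++ (PySem.List.sorted s (fun x => x) false).take l.length := by
  induction l with
  | nil => intro acc s _ _; simp
  | cons c l ih =>
    intro acc s hnd hlen
    have hne : s ≠ [] := by intro h; subst h; simp at hlen
    cases hm : PySem.List.min? s (fun x => x) with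
    | none => exact absurd ((PySem.List.min?_eq_none_iff s (fun x => x)).mp hm) hne
    | some m =>
      have hmem : m ∈ s := PySem.List.min?_mem hm
      have hlen' : l.length ≤ (s.erase m).length := by
        rw [List.length_erase_of_mem hmem]
        simp at hlen
        omega
      rw [List.foldl_cons, routeSelStep_eq acc s m hm,
        ih (acc ++ [m]) (s.erase m) (hnd.erase m) hlen',
        sorted_cons_min s hnd m hm]
      simp

-- ===== VERDICT (by name: the statement is the Claim_ definition above) =====
-- B's loop takes the first max_routes elements (none if max_routes ≤ #acc)
theorem takeSmallest_eq (m : Int) : ∀ (xs acc : List (List Int)),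
    takeSmallest m acc xs
      = if (acc.length : Int) ≥ m then acc else acc ++ xs.take (m - acc.length).toNat := by
  intro xs
  induction xs with
  | nil => intro acc; simp [takeSmallest]
  | cons t rest ih =>
    intro acc
    rw [takeSmallest]
    by_cases h : (acc.length : Int) ≥ m
    · rw [if_pos (by simpa [PySem.List.len_eq] using h), if_pos h]
    · rw [if_neg (by simpa [PySem.List.len_eq] using h), if_neg h, ih]
      have hL : (((acc ++ [t]).length : Int)) = (acc.length : Int) + 1 := by
        simp
      by_cases h2 : (((acc ++ [t]).length : Int) ≥ m)
      · rw [if_pos h2]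
        have h1 : (m - (acc.length : Int)).toNat = 1 := by
          rw [hL] at h2; omega
        rw [h1]; simp
      · rw [if_neg h2, hL]
        have ht : (m - (acc.length : Int)).toNat = (m - ((acc.length : Int) + 1)).toNat + 1 := by
          rw [hL] at h2; omega
        rw [ht, List.take_succ_cons]
        simp

-- on an empty accumulator the loop is List.take max_routes.toNat
theorem takeSmallest_nil (m : Int) (xs : List (List Int)) :
    takeSmallest m [] xs = xs.take m.toNat := by
  rw [takeSmallest_eq]
  by_cases h : ((([] : List (List Int)).length : Int) ≥ m)
  · rw [if_pos h]
    have : m.toNat = 0 := by simp at h; omega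
    rw [this, List.take_zero]
  · rw [if_neg h]
    simp

theorem route_filter_spec : Claim_equal_route_filter := by
  intro routes max_routes _ hpre
  unfold Spec_route_filter
  unfold route_filter route_filter_alt
  simp only [PySem.List.len_eq]
  set s := PySem.Set.ofList routes with hs
  have hnd : s.Nodup := PySem.Set.nodup_ofList routes
  rw [takeSmallest_nil]
  by_cases hc : (s.length : Int) > max_routes
  · simp only [hc, if_pos]
    have hlenr : (PySem.List.pyRange 0 max_routes 1).length = max_routes.toNat := by
      rw [PySem.List.length_pyRange_one]; omega
    have hle : (PySem.List.pyRange 0 max_routes 1).length ≤ s.length := by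
      rw [hlenr]; omega
    rw [sel_fold _ [] s hnd hle, hlenr, List.nil_append]
  · simp only [hc, if_false]
    have h1 : s.length ≤ 1 := by
      rcases hpre with h | h
      · exact absurd h hc
      · exact h
    match s, h1, hc with
    | [], _, _ => simp [PySem.List.sorted]
    | [x], _, hc =>
      have hm1 : 1 ≤ max_routes.toNat := by simp at hc; omega
      have hsx : PySem.List.sorted [x] (fun y => y) false = [x] := rfl
      rw [hsx, List.take_of_length_le (by simpa using hm1)]
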